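-- pv_equiv track=rewrite | github.com/GeoffWilliams/utf8cleaner | utf8cleaner/cleaner.py | clean_context_bytes
-- ===== SOURCE A (Python) =====
-- def clean_context_bytes(data):
--     cleaned = ""
--     for b in data:
--         try:
--             # iterating over `bytes` results in `integer` which in our case
--             # must then be convered back to an array of bytes with one element
--             # in order for string conversion to work properly - using `chr()`
--             # will "fix" any utf-8 errors so we won't see them
--             # https://stackoverflow.com/questions/21017698/converting-int-to-bytes-in-python-3
--             cleaned += str(bytes([b]), "utf-8")
--         except UnicodeDecodeError:
--             cleaned += "_"
--
-- #    cleaned += cleaned + " original: "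
-- #     try:
-- #         cleaned += str(data, "utf-8")
-- #     except UnicodeDecodeError:
-- #         cleaned += "unavailable"
--
--     cleaned = cleaned.replace("\n", "")
--
--     return cleaned
-- ===== SOURCE B (Python) =====
-- _TBL = bytes(i if i < 128 else ord('_') for i in range(256))
--
-- def clean_context_bytes(data):
--     return bytes(data).translate(_TBL, delete=b'\n').decode('ascii')
-- ===== Notes on version B (the rewrite author's own statement) =====
-- stated objective: idiomatic
-- what changed: Replaced the per-byte decode/try-except loop with string concatenation plus a final replace() by a precomputed 256-entry translation table applied in one bytes.translate pass with newline deletion.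
import Mathlib
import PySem

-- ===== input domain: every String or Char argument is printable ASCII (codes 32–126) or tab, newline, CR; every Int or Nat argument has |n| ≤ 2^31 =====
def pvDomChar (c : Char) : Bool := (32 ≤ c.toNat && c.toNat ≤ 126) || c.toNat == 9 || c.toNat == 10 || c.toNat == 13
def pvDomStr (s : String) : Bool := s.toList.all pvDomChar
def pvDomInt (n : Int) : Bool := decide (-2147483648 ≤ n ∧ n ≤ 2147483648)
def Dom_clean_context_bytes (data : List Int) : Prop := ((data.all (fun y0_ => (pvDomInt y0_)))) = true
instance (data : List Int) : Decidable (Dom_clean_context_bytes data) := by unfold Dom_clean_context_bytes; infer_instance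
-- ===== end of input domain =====

-- B replaces A's per-byte decode/try-except loop with string concatenation and a final
-- replace() by one precomputed 256-entry translation table pass that deletes newlines (idiomatic).

-- ===== PORT A =====
-- A builds a string byte by byte: bytes([b]).decode('utf-8') succeeds exactly for 0 ≤ b < 128
-- (Pre_ guarantees 0 ≤ b < 256, so the try/except reduces to this test), then strips '\n'.
def clean_context_bytes (data : List Int) : String :=
  let cleaned : List Char :=
    data.foldl (fun acc b =>
      acc ++ (if b < 128 then [Char.ofNat b.toNat] else ['_'])) []
  String.mk (PySem.Chars.replace cleaned ['\n'] [])

-- ===== PORT B =====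
-- the precomputed translation table: identity on 0..127, '_' on 128..255
def pvTbl : List Char := (List.range 256).map (fun i => if i < 128 then Char.ofNat i else '_')

-- bytes(data).translate(pvTbl, delete=b'\n').decode('ascii'): delete newlines, map through table
def clean_context_bytes_alt (data : List Int) : String :=
  String.mk ((data.filter (fun b => !(b == 10))).map (fun b => pvTbl.getD b.toNat '_'))

-- ===== PRECONDITION & SPEC =====
-- Pre_ excludes exactly the inputs where Python A raises: bytes([b]) raises ValueError
-- unless 0 ≤ b < 256 (B's bytes(data) raises there too).
def Pre_clean_context_bytes (data : List Int) : Prop :=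
  ∀ b ∈ data, 0 ≤ b ∧ b < 256
instance (data : List Int) : Decidable (Pre_clean_context_bytes data) := by
  unfold Pre_clean_context_bytes; infer_instance

def pvWitness_clean_context_bytes : List Int := [72, 10, 200, 33]

def Spec_clean_context_bytes (data : List Int) (out : String) : Prop := out = clean_context_bytes_alt data
instance (data : List Int) (out : String) : Decidable (Spec_clean_context_bytes data out) := by unfold Spec_clean_context_bytes; infer_instance

-- ===== CLAIM (what is proved, stated in full; the proofs are below) =====
def Claim_equal_clean_context_bytes : Prop := ∀ (data : List Int), Dom_clean_context_bytes data → Pre_clean_context_bytes data → Spec_clean_context_bytes data (clean_context_bytes data)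

-- ===== LEMMAS AND PROOFS =====

-- replacing the single character '\n' by nothing is filtering it out
theorem replace_go_newline (l : List Char) :
    ∀ (fuel : Nat) (acc : List Char), l.length ≤ fuel →
      PySem.Chars.replace.go ['\n'] [] fuel l acc
        = acc.reverse ++ l.filter (fun c => !(c == '\n')) := by
  induction l with
  | nil =>
      intro fuel acc _
      cases fuel <;> simp [PySem.Chars.replace.go]
  | cons c t ih =>
      intro fuel acc hlen
      cases fuel with
      | zero => simp at hlen
      | succ n =>
          simp only [PySem.Chars.replace.go]
          by_cases hc : c = '\n'
          · subst hc
            have hp : List.isPrefixOf ['\n'] ('\n' :: t) = true := by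
              simp [List.isPrefixOf]
            rw [if_pos hp]
            simp only [List.length_cons] at hlen
            simpa using ih n acc (by omega)
          · have hp : List.isPrefixOf ['\n'] (c :: t) = false := by
              simp [List.isPrefixOf]
              exact fun h => hc h.symm
            rw [if_neg (by simp [hp])]
            simp only [List.length_cons] at hlen
            rw [ih n (c :: acc) (by omega)]
            simp [hc]

theorem replace_newline (l : List Char) :
    PySem.Chars.replace l ['\n'] [] = l.filter (fun c => !(c == '\n')) := by
  simpa [PySem.Chars.replace] using replace_go_newline l l.length [] (le_refl _)

-- the table agrees with A's per-byte mapping on every byte value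
set_option maxRecDepth 8192 in
theorem tbl_getD (n : Nat) (h : n < 256) :
    pvTbl.getD n '_' = if n < 128 then Char.ofNat n else '_' := by
  have hall : (List.range 256).all
      (fun n => pvTbl.getD n '_' == if n < 128 then Char.ofNat n else '_') = true := by decide
  have := List.all_eq_true.mp hall n (List.mem_range.mpr h)
  exact eq_of_beq this

-- per-element: filtering '\n' out of A's one-byte chunk gives B's translate-step
theorem chunk_eq (b : Int) (h0 : 0 ≤ b) (h1 : b < 256) :
    (if b < 128 then [Char.ofNat b.toNat] else ['_']).filter (fun c => !(c == '\n'))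
      = if (b == 10) then [] else [pvTbl.getD b.toNat '_'] := by
  have hn : b.toNat < 256 := by omega
  rw [tbl_getD b.toNat hn]
  by_cases h10 : b = 10
  · subst h10; decide
  · have hne : (b == 10) = false := by simp [h10]
    rw [hne]
    by_cases h128 : b < 128
    · have h128' : b.toNat < 128 := by omega
      have hcne : Char.ofNat b.toNat ≠ '\n' := by
        intro hcontra
        have h2 := congrArg Char.toNat hcontra
        rw [Char.toNat_ofNat, if_pos (Or.inl (by omega) : Nat.isValidChar b.toNat)] at h2
        have h3 : b.toNat = 10 := by simpa using h2
        exact h10 (by omega)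
      have hbne : (Char.ofNat b.toNat == '\n') = false := by simpa using hcne
      simp [if_pos h128, List.filter, hbne]
    · have h128' : ¬ b.toNat < 128 := by omega
      simp only [if_neg h128, if_neg h128']
      simp [List.filter]

theorem flat_eq (data : List Int) (h : ∀ b ∈ data, 0 ≤ b ∧ b < 256) :
    data.flatMap (fun b => if (b == 10) then ([] : List Char) else [pvTbl.getD b.toNat '_'])
      = (data.filter (fun b => !(b == 10))).map (fun b => pvTbl.getD b.toNat '_') := by
  induction data with
  | nil => rfl
  | cons a t ih =>
      have ht := ih (fun b hb => h b (List.mem_cons_of_mem a hb))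
      by_cases ha : a = (10 : Int)
      · subst ha
        simp only [List.flatMap_cons, List.filter_cons, beq_self_eq_true, if_true,
          Bool.not_true, List.nil_append]
        exact ht
      · have hb : (a == (10 : Int)) = false := beq_eq_false_iff_ne.mpr ha
        simp only [List.flatMap_cons, List.filter_cons, hb, Bool.false_eq_true, if_false,
          Bool.not_false, List.singleton_append]
        rw [if_pos trivial, List.map_cons, ht]

-- ===== VERDICT (by name: the statement is the Claim_ definition above) =====
theorem clean_context_bytes_spec : Claim_equal_clean_context_bytes := by
  intro data _ hpre
  unfold Spec_clean_context_bytes clean_context_bytes clean_context_bytes_alt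
  simp only [PySem.List.foldl_append_eq_flatMap, List.nil_append]
  rw [replace_newline, List.filter_flatMap]
  congr 1
  rw [← flat_eq data hpre]
  apply List.flatMap_congr  -- pointwise over members
  intro b hb
  exact chunk_eq b (hpre b hb).1 (hpre b hb).2
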